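-- pv_equiv track=rewrite | github.com/CinnamonRolls1/IT-6th-Sem | DM/LAB1/fp.py | combi_cutoff
-- ===== SOURCE A (Python) =====
-- def combi_cutoff(combi,v,su):
-- 	final=[]
-- 	for c in combi:
-- 		s=0
-- 		for row in v:
-- 			f=0
-- 			for ele in c:
-- 				if ele not in row:
-- 					f=1
-- 			if f==0:
-- 				s=s+row[-1]
-- 		if s>su-1:
-- 			final.append(c)
-- 	return final
-- ===== SOURCE B (Python) =====
-- def combi_cutoff(combi, v, su):
--     sums = [0] * len(combi)
--     for row in v:
--         rs = set(row)
--         sums = [s + row[-1] if all(e in rs for e in c) else s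
--                 for c, s in zip(combi, sums)]
--     return [c for c, s in zip(combi, sums) if s > su - 1]
-- ===== Notes on version B (the rewrite author's own statement) =====
-- stated objective: faster
-- what changed: Interchanges the loops: one pass over the rows updates a per-combination running-sum array (membership tested against a set built once per row), then the combinations are filtered by their accumulated sums, instead of A's per-combination rescan of every row with a linear 'in' test per element.
import Mathlib
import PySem

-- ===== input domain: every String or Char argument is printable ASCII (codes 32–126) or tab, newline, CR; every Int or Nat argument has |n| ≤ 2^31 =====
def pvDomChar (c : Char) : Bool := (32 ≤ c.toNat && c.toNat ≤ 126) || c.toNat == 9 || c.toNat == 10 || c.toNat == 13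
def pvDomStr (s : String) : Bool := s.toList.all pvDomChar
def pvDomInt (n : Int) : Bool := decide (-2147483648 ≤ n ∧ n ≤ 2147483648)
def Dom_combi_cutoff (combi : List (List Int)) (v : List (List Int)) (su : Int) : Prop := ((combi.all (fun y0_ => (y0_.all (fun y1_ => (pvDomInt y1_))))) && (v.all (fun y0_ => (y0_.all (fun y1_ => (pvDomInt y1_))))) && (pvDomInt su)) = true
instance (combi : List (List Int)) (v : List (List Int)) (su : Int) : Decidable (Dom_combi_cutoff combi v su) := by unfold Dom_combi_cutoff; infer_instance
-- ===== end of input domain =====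

-- B interchanges A's loops (one pass over rows updating per-combination running sums, membership
-- via a per-row set) for a constant-factor speedup; return values agree on all of Pre_.

-- ===== PORT A =====
def combi_cutoff (combi : List (List Int)) (v : List (List Int)) (su : Int) : List (List Int) :=
  combi.foldl (fun final c =>
    let s := v.foldl (fun s row =>
      let f := c.foldl (fun f ele => if ¬ (ele ∈ row) then (1 : Int) else f) 0
      if f = 0 then s + PySem.List.pyGetD row (-1) 0 else s) 0
    if s > su - 1 then final ++ [c] else final) []

-- ===== PORT B =====
def combi_cutoff_alt (combi : List (List Int)) (v : List (List Int)) (su : Int) : List (List Int) :=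
  let sums0 : List Int := combi.map (fun _ => 0)
  let sums := v.foldl (fun sums row =>
    let rs : PySem.Set Int := PySem.Set.ofList row
    (combi.zip sums).map (fun p =>
      if p.1.all (fun e => PySem.Set.contains rs e) then p.2 + PySem.List.pyGetD row (-1) 0 else p.2)) sums0
  ((combi.zip sums).filter (fun p => p.2 > su - 1)).map (fun p => p.1)

-- ===== PRECONDITION & SPEC =====
-- Pre_ excludes exactly the inputs where Python A raises IndexError (row[-1] on an empty row,
-- which is read exactly when the empty combination is present): both empty in combi and empty in v.
def Pre_combi_cutoff (combi : List (List Int)) (v : List (List Int)) (su : Int) : Prop :=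
  ¬ (([] : List Int) ∈ combi ∧ ([] : List Int) ∈ v)
instance (combi : List (List Int)) (v : List (List Int)) (su : Int) : Decidable (Pre_combi_cutoff combi v su) := by unfold Pre_combi_cutoff; infer_instance

def pvWitness_combi_cutoff : List (List Int) × List (List Int) × Int := ([[1], [2]], [[1, 2, 5], [2, 3]], 4)

def Spec_combi_cutoff (combi : List (List Int)) (v : List (List Int)) (su : Int) (out : List (List Int)) : Prop := out = combi_cutoff_alt combi v su
instance (combi : List (List Int)) (v : List (List Int)) (su : Int) (out : List (List Int)) : Decidable (Spec_combi_cutoff combi v su out) := by unfold Spec_combi_cutoff; infer_instance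

-- ===== CLAIM (what is proved, stated in full; the proofs are below) =====
def Claim_equal_combi_cutoff : Prop := ∀ (combi : List (List Int)) (v : List (List Int)) (su : Int), Dom_combi_cutoff combi v su → Pre_combi_cutoff combi v su → Spec_combi_cutoff combi v su (combi_cutoff combi v su)

-- ===== LEMMAS AND PROOFS =====

-- The common per-combination row sum both programs compute.
def pvInnerS (v : List (List Int)) (c : List Int) : Int :=
  v.foldl (fun s row => if c.all (fun e => decide (e ∈ row)) then s + PySem.List.pyGetD row (-1) 0 else s) 0

-- A's flag loop: the fold is `init` iff every element of c is in row, else 1.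
lemma pv_flag_eq (c row : List Int) (f : Int) :
    c.foldl (fun f ele => if ¬ (ele ∈ row) then (1 : Int) else f) f
      = if c.all (fun e => decide (e ∈ row)) then f else 1 := by
  induction c generalizing f with
  | nil => simp
  | cons x c ih =>
    simp only [List.foldl_cons]
    by_cases hx : x ∈ row
    · have h1 : (if ¬ (x ∈ row) then (1 : Int) else f) = f := by simp [hx]
      rw [h1, ih]
      simp [hx]
    · have h1 : (if ¬ (x ∈ row) then (1 : Int) else f) = 1 := by simp [hx]
      rw [h1, ih]
      simp [hx]

lemma pv_a_eq_filter (combi v : List (List Int)) (su : Int) :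
    combi_cutoff combi v su = combi.filter (fun c => decide (pvInnerS v c > su - 1)) := by
  unfold combi_cutoff
  have hf : (fun (final : List (List Int)) c =>
      let s := v.foldl (fun s row =>
        let f := c.foldl (fun f ele => if ¬ (ele ∈ row) then (1 : Int) else f) 0
        if f = 0 then s + PySem.List.pyGetD row (-1) 0 else s) 0
      if s > su - 1 then final ++ [c] else final)
      = (fun final c => if pvInnerS v c > su - 1 then final ++ [c] else final) := by
    funext final c
    have hinner : (fun (s : Int) (row : List Int) =>
        let f := c.foldl (fun f ele => if ¬ (ele ∈ row) then (1 : Int) else f) 0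
        if f = 0 then s + PySem.List.pyGetD row (-1) 0 else s)
        = (fun s row => if c.all (fun e => decide (e ∈ row)) then s + PySem.List.pyGetD row (-1) 0 else s) := by
      funext s row
      simp only [pv_flag_eq]
      by_cases h : c.all (fun e => decide (e ∈ row)) <;> simp [h]
    simp only [hinner, pvInnerS]
    rfl
  rw [hf]
  simpa using PySem.List.foldl_append_ite_eq_filter (fun c => pvInnerS v c > su - 1) combi []

-- zipping a list with a map of itself is a single map producing the pairs.
lemma pv_zip_pair {a b : Type} (l : List a) (g : a -> b) :
    l.zip (l.map g) = l.map (fun x => (x, g x)) := by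
  induction l with
  | nil => rfl
  | cons x l ih => simp [List.zip] at ih ⊢; exact ih

-- membership in the per-row set agrees with list membership.
lemma pv_contains_eq (row : List Int) (e : Int) :
    PySem.Set.contains (PySem.Set.ofList row) e = decide (e ∈ row) := by
  by_cases h : e ∈ row <;> simp [PySem.Set.mem_ofList, h]

-- B's loop invariant: folding the rows over a map-shaped sum list stays map-shaped,
-- each combination accumulating its own row sum.
lemma pv_b_inv (v combi : List (List Int)) (g : List Int → Int) :
    v.foldl (fun sums row =>
        (combi.zip sums).map (fun p =>
          if p.1.all (fun e => PySem.Set.contains (PySem.Set.ofList row) e) then p.2 + PySem.List.pyGetD row (-1) 0 else p.2))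
      (combi.map g)
    = combi.map (fun c =>
        v.foldl (fun s row => if c.all (fun e => decide (e ∈ row)) then s + PySem.List.pyGetD row (-1) 0 else s) (g c)) := by
  induction v generalizing g with
  | nil => rfl
  | cons row v ih =>
    simp only [List.foldl_cons]
    rw [pv_zip_pair combi g, List.map_map]
    have hstep : (combi.map ((fun p : List Int × Int =>
        if p.1.all (fun e => PySem.Set.contains (PySem.Set.ofList row) e) then p.2 + PySem.List.pyGetD row (-1) 0 else p.2)
          ∘ (fun x => (x, g x))))
        = combi.map (fun c => if c.all (fun e => decide (e ∈ row)) then g c + PySem.List.pyGetD row (-1) 0 else g c) := by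
      apply List.map_congr_left
      intro c _
      simp only [Function.comp]
      simp only [pv_contains_eq]
    rw [hstep, ih]

lemma pv_b_eq_filter (combi v : List (List Int)) (su : Int) :
    combi_cutoff_alt combi v su = combi.filter (fun c => decide (pvInnerS v c > su - 1)) := by
  unfold combi_cutoff_alt
  simp only [pv_b_inv v combi (fun _ => 0)]
  rw [pv_zip_pair]
  rw [List.filter_map, List.map_map]
  simp [pvInnerS, Function.comp_def]

-- ===== VERDICT (by name: the statement is the Claim_ definition above) =====
theorem combi_cutoff_spec : Claim_equal_combi_cutoff := by
  intro combi v su _ _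
  unfold Spec_combi_cutoff
  rw [pv_a_eq_filter, pv_b_eq_filter]
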